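-- pv_equiv track=rewrite | github.com/PaklinaNatalia/pythonSummerProject2023 | Scratches/Scratch_1/Scratch_1.0.py | uni_let
-- ===== SOURCE A (Python) =====
-- def uni_let(lst):
--     tes = set()
--     for i in lst:
--         for j in i:
--             tes.add(j)
--     sorted_tes = sorted(tes)
--     res1 = "".join(sorted_tes)
--     return res1, len(res1)
-- ===== SOURCE B (Python) =====
-- def uni_let(lst):
--     s = sorted("".join(lst))
--     res = []
--     for ch in s:
--         if not res or ch != res[-1]:
--             res.append(ch)
--     res1 = "".join(res)
--     return res1, len(res1)
-- ===== Notes on version B (the rewrite author's own statement) =====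
-- stated objective: alternative
-- what changed: B replaces A's hash-set accumulation (nested loops adding each character to a set, then sorting the set) by sorting the full concatenated character sequence once and removing adjacent duplicates in a single linear scan; no set is maintained.
import Mathlib
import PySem

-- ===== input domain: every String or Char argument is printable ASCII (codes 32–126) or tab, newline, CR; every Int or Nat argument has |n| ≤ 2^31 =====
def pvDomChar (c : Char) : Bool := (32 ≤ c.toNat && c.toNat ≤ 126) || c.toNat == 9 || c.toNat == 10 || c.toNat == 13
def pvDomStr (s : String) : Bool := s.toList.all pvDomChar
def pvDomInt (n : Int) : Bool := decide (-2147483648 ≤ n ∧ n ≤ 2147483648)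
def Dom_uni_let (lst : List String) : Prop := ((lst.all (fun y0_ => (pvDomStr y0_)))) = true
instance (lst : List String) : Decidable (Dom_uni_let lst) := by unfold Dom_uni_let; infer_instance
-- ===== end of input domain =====

-- B sorts the concatenated characters once and drops adjacent duplicates in one linear scan,
-- instead of A's set accumulation followed by a sort (alternative decomposition, same result).

-- ===== PORT A =====
def uni_let (lst : List String) : String × Int :=
  let tes : PySem.Set Char :=
    lst.foldl (fun tes i => i.toList.foldl (fun t j => PySem.Set.add t j) tes) PySem.Set.empty
  let sorted_tes := PySem.List.sorted tes (fun x => x) false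
  let res1 := String.ofList sorted_tes   -- "".join of a list of single characters
  (res1, PySem.Str.len res1)

-- ===== PORT B =====
-- one step of B's loop: append ch unless it equals the last kept character
def dedupStep (res : List Char) (ch : Char) : List Char :=
  if res = [] ∨ PySem.List.pyGet? res (-1) ≠ some ch then res ++ [ch] else res

def uni_let_alt (lst : List String) : String × Int :=
  let s := PySem.List.sorted (PySem.Str.join "" lst).toList (fun x => x) false
  let res := s.foldl dedupStep []
  let res1 := String.ofList res   -- "".join of the kept characters
  (res1, PySem.Str.len res1)

-- ===== PRECONDITION & SPEC =====
def Spec_uni_let (lst : List String) (out : String × Int) : Prop := out = uni_let_alt lst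
instance (lst : List String) (out : String × Int) : Decidable (Spec_uni_let lst out) := by unfold Spec_uni_let; infer_instance

-- ===== CLAIM (what is proved, stated in full; the proofs are below) =====
def Claim_equal_uni_let : Prop := ∀ (lst : List String), Dom_uni_let lst → Spec_uni_let lst (uni_let lst)

-- ===== LEMMAS AND PROOFS =====

-- A's nested set-building loop is foldl add over the concatenation of all characters
lemma nested_fold_eq (lst : List String) (s : PySem.Set Char) :
    lst.foldl (fun tes i => i.toList.foldl (fun t j => PySem.Set.add t j) tes) s
      = (lst.map String.toList).flatten.foldl (fun t j => PySem.Set.add t j) s := by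
  induction lst generalizing s with
  | nil => rfl
  | cons x t ih => simp [List.foldl_append, ih]

-- "".join over a list of strings concatenates their character lists
lemma join_empty_toList (lst : List String) :
    (PySem.Str.join "" lst).toList = (lst.map String.toList).flatten := by
  simp [pysem, PySem.Chars.join, List.intercalate]
  induction (lst.map String.toList) with
  | nil => rfl
  | cons x t ih =>
    cases t with
    | nil => simp
    | cons y u => simp_all [List.intersperse]

-- in a ≤-sorted list every element is at most the last one
lemma le_getLast_of_pairwise {l : List Char} (hl : l.Pairwise (· ≤ ·))
    {a : Char} (ha : a ∈ l) (h : l ≠ []) : a ≤ l.getLast h := by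
  induction l with
  | nil => exact absurd rfl h
  | cons x t ih =>
    rcases List.pairwise_cons.mp hl with ⟨hx, ht⟩
    cases t with
    | nil => simp at ha; simp [ha]
    | cons y u =>
      rw [List.getLast_cons (by simp)]
      rcases List.mem_cons.mp ha with rfl | ha'
      · exact le_trans (hx _ (List.getLast_mem _)) (le_refl _)
      · exact ih ht ha' (by simp)

-- invariant of B's dedup loop on a ≤-sorted input
lemma fold_dedup (s : List Char) (acc : List Char) (hacc : acc.Pairwise (· < ·))
    (hs : s.Pairwise (· ≤ ·)) (hconn : ∀ a ∈ acc, ∀ b ∈ s, a ≤ b) :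
    (s.foldl dedupStep acc).Pairwise (· < ·) ∧
    (∀ x, x ∈ s.foldl dedupStep acc ↔ x ∈ acc ∨ x ∈ s) := by
  induction s generalizing acc with
  | nil => simp [hacc]
  | cons ch rest ih =>
    rcases List.pairwise_cons.mp hs with ⟨hch, hrest⟩
    rw [List.foldl_cons]
    by_cases hcond : acc = [] ∨ PySem.List.pyGet? acc (-1) ≠ some ch
    · -- append branch
      have hstep : dedupStep acc ch = acc ++ [ch] := by simp [dedupStep, hcond]
      have hlt : ∀ a ∈ acc, a < ch := by
        intro a ha
        rcases hcond with hnil | hlast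
        · simp [hnil] at ha
        · have hne : acc ≠ [] := by intro h; simp [h] at ha
          have hl := le_getLast_of_pairwise (hacc.imp le_of_lt) ha hne
          have hlm : acc.getLast hne ≤ ch :=
            hconn _ (List.getLast_mem hne) ch (List.mem_cons_self)
          have hlne : acc.getLast hne ≠ ch := by
            intro h
            apply hlast
            rw [PySem.List.pyGet?_neg_one, List.getLast?_eq_getLast_of_ne_nil hne, h]
          exact lt_of_le_of_lt hl (lt_of_le_of_ne hlm hlne)
      rw [hstep]
      have hacc' : (acc ++ [ch]).Pairwise (· < ·) := by
        rw [List.pairwise_append]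
        exact ⟨hacc, by simp, by simpa using hlt⟩
      have hconn' : ∀ a ∈ acc ++ [ch], ∀ b ∈ rest, a ≤ b := by
        intro a ha b hb
        rcases List.mem_append.mp ha with ha' | ha'
        · exact hconn a ha' b (List.mem_cons_of_mem _ hb)
        · simp at ha'; subst ha'; exact hch b hb
      obtain ⟨h1, h2⟩ := ih (acc ++ [ch]) hacc' hrest hconn'
      refine ⟨h1, fun x => ?_⟩
      rw [h2]
      simp [or_assoc, or_comm, or_left_comm]
    · -- skip branch: ch is the last element of acc already
      have hstep : dedupStep acc ch = acc := by simp [dedupStep, hcond]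
      push Not at hcond
      obtain ⟨hne, hlast⟩ := hcond
      have hchmem : ch ∈ acc := by
        rw [PySem.List.pyGet?_neg_one, List.getLast?_eq_getLast_of_ne_nil hne] at hlast
        rw [← Option.some_inj.mp hlast]
        exact List.getLast_mem hne
      rw [hstep]
      obtain ⟨h1, h2⟩ := ih acc hacc hrest
        (fun a ha b hb => hconn a ha b (List.mem_cons_of_mem _ hb))
      refine ⟨h1, fun x => ?_⟩
      rw [h2]
      constructor
      · tauto
      · rintro (h | h)
        · exact Or.inl h
        · rcases List.mem_cons.mp h with rfl | h'
          · exact Or.inl hchmem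
          · exact Or.inr h'

-- the heart of the equivalence: sorting the deduplicated set = deduplicating the sorted list
lemma sort_set_eq_dedup (cs : List Char) :
    PySem.List.sorted (PySem.Set.ofList cs) (fun x => x) false
      = (PySem.List.sorted cs (fun x => x) false).foldl dedupStep [] := by
  have hL : (PySem.List.sorted (PySem.Set.ofList cs) (fun x => x) false).Pairwise (· < ·) :=
    PySem.List.sorted_ofList_pairwise_lt cs
  have hs : (PySem.List.sorted cs (fun x => x) false).Pairwise (· ≤ ·) := by
    simpa using PySem.List.sorted_pairwise (xs := cs) (key := fun x => x)
  obtain ⟨hR, hmem⟩ := fold_dedup _ [] (by simp) hs (by simp)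
  refine List.Perm.eq_of_pairwise ?_ hL hR ?_
  · intro a b _ _ h1 h2
    exact absurd h1 (not_lt.mpr h2.le)
  · rw [List.perm_ext_iff_of_nodup (hL.imp ne_of_lt) (hR.imp ne_of_lt)]
    intro x
    rw [hmem]
    simp [PySem.List.mem_sorted, PySem.Set.mem_ofList]

-- ===== VERDICT (by name: the statement is the Claim_ definition above) =====
theorem uni_let_spec : Claim_equal_uni_let := by
  intro lst _
  unfold Spec_uni_let uni_let uni_let_alt
  dsimp only
  rw [nested_fold_eq, join_empty_toList]
  rw [show ((lst.map String.toList).flatten.foldl (fun t j => PySem.Set.add t j) PySem.Set.empty)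
        = PySem.Set.ofList (lst.map String.toList).flatten from rfl]
  rw [sort_set_eq_dedup]
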